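-- pv_equiv track=rewrite | github.com/miliar/Code_Jam_Webscraper | solutions_python/solutions_year17_round1_nr1/289.py | fill_line
-- ===== SOURCE A (Python) =====
-- def fill_line(line):
--     letters = list(line)
--     started = False
--     lastchar = '='
--     for i in range(len(letters)):
--         if letters[i] == '?':
--             if not started:
--                 pass
--             else:
--                 letters[i] = lastchar
--         else:
--             lastchar = letters[i]
--             if not started:
--                 for j in range(i):
--                     letters[j] = lastchar
--                 started = True
--     return ''.join(letters)
-- ===== SOURCE B (Python) =====
-- def fill_line(line):
--     parts = line.split('?')
--     first = None
--     for p in parts: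
--         if p:
--             first = p[0]
--             break
--     if first is None:
--         return line
--     prev = parts[0][-1] if parts[0] else first
--     out = [parts[0]]
--     for p in parts[1:]:
--         out.append(prev)
--         out.append(p)
--         if p:
--             prev = p[-1]
--     return ''.join(out)
-- ===== Notes on version B (the rewrite author's own statement) =====
-- stated objective: alternative
-- what changed: B splits the line on the question-mark placeholder into segments, finds the first known character, and stitches the segments back with one filler character per placeholder taken from the last character of the preceding segments, instead of A's char-by-char scan that mutates a list copy and backfills the leading prefix with an inner index loop. The segment work is done by the C-implemented str.split and str.join instead of a per-character interpreted loop, a constant-factor speedup.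
import Mathlib
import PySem

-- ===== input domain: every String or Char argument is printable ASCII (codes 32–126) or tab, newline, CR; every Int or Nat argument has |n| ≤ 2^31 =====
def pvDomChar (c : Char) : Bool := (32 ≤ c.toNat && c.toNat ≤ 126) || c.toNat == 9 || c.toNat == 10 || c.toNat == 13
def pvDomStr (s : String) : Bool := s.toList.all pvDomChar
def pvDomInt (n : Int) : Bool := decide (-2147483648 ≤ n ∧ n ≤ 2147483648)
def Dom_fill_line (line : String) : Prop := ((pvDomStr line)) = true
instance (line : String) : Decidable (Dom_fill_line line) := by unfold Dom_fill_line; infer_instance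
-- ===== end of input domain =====

-- B splits the line on the question-mark placeholder into segments and stitches them back with filler characters, instead of A's char-by-char scan with in-place mutation and an inner backfill loop (alternative algorithm, same cost).

-- ===== PORT A =====
-- one loop iteration of A (index i; letters[i] is always in range since i < len(letters))
def fillStep (st : List Char × Bool × Char) (i : Nat) : List Char × Bool × Char :=
  let letters := st.1
  let started := st.2.1
  let lastchar := st.2.2
  if letters.getD i ' ' = '?' then
    if !started then (letters, started, lastchar)
    else (letters.set i lastchar, started, lastchar)
  else
    let lastchar := letters.getD i ' '
    if !started then
      ((List.range i).foldl (fun ls j => ls.set j lastchar) letters, true, lastchar)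
    else (letters, started, lastchar)

def fill_line (line : String) : String :=
  let letters := line.toList
  let res := (List.range letters.length).foldl fillStep (letters, false, '=')
  String.ofList res.1

-- ===== PORT B =====
-- exact hand port of Python's line.split('?') for the single-character separator '?'
def splitQ : List Char → List (List Char)
  | [] => [[]]
  | c :: rest =>
    if c = '?' then [] :: splitQ rest
    else
      match splitQ rest with
      | [] => [[c]]   -- unreachable: splitQ never returns []
      | p :: ps => (c :: p) :: ps

-- Source B's first loop: first char of the first nonempty part, else None
def firstKnownPart : List (List Char) → Option Char
  | [] => none
  | [] :: ps => firstKnownPart ps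
  | (c :: _) :: _ => some c

-- Source B's second loop over parts[1:]: emit prev then p, updating prev to p[-1] when p is nonempty
def stitchQ (prev : Char) : List (List Char) → List Char
  | [] => []
  | p :: ps => prev :: (p ++ stitchQ (p.getLastD prev) ps)

def fill_line_alt (line : String) : String :=
  let parts := splitQ line.toList
  match firstKnownPart parts with
  | none => line
  | some first =>
    String.ofList ((parts.headD []) ++ stitchQ ((parts.headD []).getLastD first) parts.tail)

-- ===== PRECONDITION & SPEC =====
def Spec_fill_line (line : String) (out : String) : Prop := out = fill_line_alt line
instance (line : String) (out : String) : Decidable (Spec_fill_line line out) := by unfold Spec_fill_line; infer_instance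

-- ===== CLAIM (what is proved, stated in full; the proofs are below) =====
def Claim_equal_fill_line : Prop := ∀ (line : String), Dom_fill_line line → Spec_fill_line line (fill_line line)

-- ===== LEMMAS AND PROOFS =====

-- reference: propagate last known char c
def fillFrom (c : Char) : List Char → List Char
  | [] => []
  | ch :: rest => if ch = '?' then c :: fillFrom c rest else ch :: fillFrom ch rest

-- reference: p leading '?' seen so far
def refFill : Nat → List Char → List Char
  | p, [] => List.replicate p '?'
  | p, ch :: rest => if ch = '?' then refFill (p + 1) rest
                     else List.replicate p ch ++ ch :: fillFrom ch rest

theorem getD_append_len (pre : List Char) (ch : Char) (suf : List Char) (d : Char) :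
    (pre ++ ch :: suf).getD pre.length d = ch := by
  induction pre with
  | nil => rfl
  | cons a t ih => simpa using ih

theorem set_append_len (pre suf : List Char) (x : Char) :
    (pre ++ suf).set pre.length x = pre ++ suf.set 0 x := by
  induction pre with
  | nil => rfl
  | cons a t ih => simpa using ih

theorem setRange (n : Nat) (ls : List Char) (c : Char) (h : n ≤ ls.length) :
    (List.range n).foldl (fun l j => l.set j c) ls = List.replicate n c ++ ls.drop n := by
  induction n with
  | zero => simp
  | succ n ih =>
    have hn : n < ls.length := by omega
    rw [List.range_succ, List.foldl_append, ih (by omega)]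
    have h1 := set_append_len (List.replicate n c) (ls.drop n) c
    simp only [List.length_replicate] at h1
    have h2 : (ls.drop n).set 0 c = c :: ls.drop (n + 1) := by
      rw [List.drop_eq_getElem_cons hn]; rfl
    simp only [List.foldl, h1, h2]
    rw [List.replicate_succ']
    simp

theorem lemmaA_started (suf : List Char) : ∀ (pre : List Char) (c : Char),
    ((List.range' pre.length suf.length).foldl fillStep (pre ++ suf, true, c)).1
      = pre ++ fillFrom c suf := by
  induction suf with
  | nil => intro pre c; simp [fillFrom]
  | cons ch rest ih =>
    intro pre c
    rw [List.length_cons, List.range'_succ, List.foldl_cons]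
    by_cases hch : ch = '?'
    · have hstep : fillStep (pre ++ ch :: rest, true, c) pre.length
          = (pre ++ c :: rest, true, c) := by
        simp [fillStep, getD_append_len, set_append_len, hch]
      rw [hstep]
      have := ih (pre ++ [c]) c
      simp only [List.length_append, List.length_cons, List.length_nil, List.append_assoc,
        List.singleton_append] at this ⊢
      rw [this]
      simp [fillFrom, hch]
    · have hstep : fillStep (pre ++ ch :: rest, true, c) pre.length
          = (pre ++ ch :: rest, true, ch) := by
        simp [fillStep, getD_append_len, hch]
      rw [hstep]
      have := ih (pre ++ [ch]) ch
      simp only [List.length_append, List.length_cons, List.length_nil, List.append_assoc,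
        List.singleton_append] at this ⊢
      rw [this]
      simp [fillFrom, hch]

theorem lemmaA_none (suf : List Char) : ∀ (p : Nat) (lc : Char),
    ((List.range' p suf.length).foldl fillStep (List.replicate p '?' ++ suf, false, lc)).1
      = refFill p suf := by
  induction suf with
  | nil => intro p lc; simp [refFill]
  | cons ch rest ih =>
    intro p lc
    rw [List.length_cons, List.range'_succ, List.foldl_cons]
    have hget : (List.replicate p '?' ++ ch :: rest).getD p ' ' = ch := by
      have := getD_append_len (List.replicate p '?') ch rest ' '
      simpa using this
    by_cases hch : ch = '?'
    · have hstep : fillStep (List.replicate p '?' ++ ch :: rest, false, lc) p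
          = (List.replicate p '?' ++ ch :: rest, false, lc) := by
        simp [fillStep, hget, hch]
      rw [hstep]
      have hpre : List.replicate p '?' ++ ch :: rest
          = List.replicate (p + 1) '?' ++ rest := by
        rw [List.replicate_succ', hch]; simp
      rw [hpre]
      have := ih (p + 1) lc
      simpa [refFill, hch] using this
    · have hset := setRange p (List.replicate p '?' ++ ch :: rest) ch (by simp)
      have hdrop : (List.replicate p '?' ++ ch :: rest).drop p = ch :: rest := by
        simp
      have hstep : fillStep (List.replicate p '?' ++ ch :: rest, false, lc) p
          = (List.replicate p ch ++ ch :: rest, true, ch) := by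
        simp only [fillStep, hget, hch, if_false, Bool.not_false, if_true]
        rw [hset, hdrop]
      rw [hstep]
      have := lemmaA_started rest (List.replicate p ch ++ [ch]) ch
      simp only [List.length_append, List.length_replicate, List.length_cons,
        List.length_nil, List.append_assoc, List.singleton_append] at this ⊢
      rw [this]
      simp [refFill, hch]

-- B-side: the value Source B computes once the first known char f is found
def bCore (l : List Char) (f : Char) : List Char :=
  (splitQ l).headD [] ++ stitchQ (((splitQ l).headD []).getLastD f) (splitQ l).tail

theorem splitQ_ne_nil (l : List Char) : splitQ l ≠ [] := by
  cases l with
  | nil => simp [splitQ]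
  | cons c rest =>
    simp only [splitQ]
    split
    · simp
    · cases h : splitQ rest <;> simp

theorem bCore_eq_fillFrom (l : List Char) : ∀ c, fillFrom c l = bCore l c := by
  induction l with
  | nil => intro c; simp [fillFrom, bCore, splitQ, stitchQ]
  | cons ch rest ih =>
    intro c
    by_cases hch : ch = '?'
    · cases h : splitQ rest with
      | nil => exact absurd h (splitQ_ne_nil rest)
      | cons p ps =>
        have hr := ih c
        simp only [bCore, h, List.headD_cons, List.tail_cons] at hr
        simp only [fillFrom, hch, if_true, bCore, splitQ, if_pos hch, h,
          List.headD_cons, List.tail_cons, stitchQ, List.getLastD_nil, List.nil_append]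
        rw [hr]
    · cases h : splitQ rest with
      | nil => exact absurd h (splitQ_ne_nil rest)
      | cons p ps =>
        have hr := ih ch
        simp only [bCore, h, List.headD_cons, List.tail_cons] at hr
        simp only [fillFrom, hch, if_false, bCore, splitQ, if_neg hch, h,
          List.headD_cons, List.tail_cons, List.getLastD_cons, List.cons_append]
        rw [hr]

theorem firstKnownPart_splitQ (l : List Char) :
    firstKnownPart (splitQ l) = l.find? (fun ch => ch != '?') := by
  induction l with
  | nil => simp [splitQ, firstKnownPart]
  | cons ch rest ih =>
    by_cases hch : ch = '?'
    · simp [splitQ, hch, firstKnownPart, List.find?, ih]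
    · have hb : (ch != '?') = true := by simp [hch]
      cases h : splitQ rest with
      | nil => exact absurd h (splitQ_ne_nil rest)
      | cons p ps => simp [splitQ, hch, h, firstKnownPart, List.find?, hb]

theorem refFill_all_q (l : List Char) (hnone : l.find? (fun ch => ch != '?') = none) :
    ∀ p, refFill p l = List.replicate p '?' ++ l := by
  induction l with
  | nil => intro p; simp [refFill]
  | cons ch rest ih =>
    intro p
    by_cases hch : ch = '?'
    · have hb : (ch != '?') = false := by simp [hch]
      rw [List.find?_cons_of_neg (by simp [hb])] at hnone
      simp only [hch, refFill, if_pos rfl]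
      rw [ih hnone (p + 1), List.replicate_succ']
      simp [hch]
    · have hb : (ch != '?') = true := by simp [hch]
      rw [show List.find? (fun c => c != '?') (ch :: rest) = some ch from
        List.find?_cons_of_pos (by simp [hch])] at hnone
      simp at hnone
  
theorem refFill_known (l : List Char) : ∀ f, l.find? (fun ch => ch != '?') = some f →
    ∀ p, refFill p l = List.replicate p f ++ bCore l f := by
  induction l with
  | nil => intro f hf; simp [List.find?] at hf
  | cons ch rest ih =>
    intro f hf p
    by_cases hch : ch = '?'
    · have hf' : rest.find? (fun ch => ch != '?') = some f := by
        simpa [List.find?, hch] using hf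
      have hcore : bCore (ch :: rest) f = f :: bCore rest f := by
        cases h : splitQ rest with
        | nil => exact absurd h (splitQ_ne_nil rest)
        | cons p0 ps =>
          simp [bCore, splitQ, hch, h, stitchQ]
      rw [hcore]
      simp only [refFill, hch, if_pos rfl]
      rw [ih f hf' (p + 1), List.replicate_succ']
      simp
    · have hfch : ch = f := by
        rw [List.find?_cons_of_pos (by simp [hch])] at hf
        exact (Option.some.injEq _ _ ▸ hf)
      subst hfch
      rw [← bCore_eq_fillFrom (ch :: rest) ch]
      simp [refFill, fillFrom, hch]

-- ===== VERDICT (by name: the statement is the Claim_ definition above) =====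
theorem fill_line_spec : Claim_equal_fill_line := by
  intro line _
  unfold Spec_fill_line
  have hA : fill_line line = String.ofList (refFill 0 line.toList) := by
    show String.ofList ((List.range line.toList.length).foldl fillStep (line.toList, false, '=')).1 = _
    rw [List.range_eq_range']
    have h := lemmaA_none line.toList 0 '='
    simpa using congrArg String.ofList h
  rw [hA]
  simp only [fill_line_alt]
  cases h : firstKnownPart (splitQ line.toList) with
  | none =>
    have hf : line.toList.find? (fun ch => ch != '?') = none := by
      rw [← firstKnownPart_splitQ, h]
    rw [refFill_all_q _ hf 0]
    simp only [List.replicate_zero, List.nil_append]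
    exact (String.ofList_toList : String.ofList line.toList = line)
  | some f =>
    have hf : line.toList.find? (fun ch => ch != '?') = some f := by
      rw [← firstKnownPart_splitQ, h]
    rw [refFill_known _ f hf 0]
    simp [bCore]
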